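-- pv_equiv track=rewrite | github.com/Ryan-JW-Kim/Year3Sem2 | CP312/a1/assignment.py | function
-- ===== SOURCE A (Python) =====
-- def function(ls, target):
--
-- 	n = len(ls)
--
-- 	for i in range(n):
-- 		for j in range(n):
--
-- 			if i != j and abs(ls[i] - ls[j]) <= target:
-- 				return True
--
-- 	return False
--
-- 	pass
-- ===== SOURCE B (Python) =====
-- def function(ls, target):
--     s = sorted(ls)
--     return any(b - a <= target for a, b in zip(s, s[1:]))
-- ===== Notes on version B (the rewrite author's own statement) =====
-- stated objective: alternative
-- what changed: Replaces the quadratic all-pairs scan with sorting followed by a single adjacent-difference scan: the minimum absolute pairwise difference is attained by adjacent elements of the sorted list (O(n log n) worst case, but A's early exit makes A fast on typical inputs).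
import Mathlib
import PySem

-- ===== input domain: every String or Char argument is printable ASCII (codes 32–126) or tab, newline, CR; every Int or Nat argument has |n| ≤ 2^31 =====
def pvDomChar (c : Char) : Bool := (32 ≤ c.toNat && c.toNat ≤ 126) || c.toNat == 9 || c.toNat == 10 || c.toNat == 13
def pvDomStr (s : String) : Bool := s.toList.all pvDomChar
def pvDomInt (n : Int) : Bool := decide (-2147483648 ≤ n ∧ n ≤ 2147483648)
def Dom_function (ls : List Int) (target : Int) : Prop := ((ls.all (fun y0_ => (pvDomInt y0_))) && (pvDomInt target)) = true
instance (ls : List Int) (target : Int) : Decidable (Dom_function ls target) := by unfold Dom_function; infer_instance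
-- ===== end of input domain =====

-- B replaces A's nested all-pairs scan by sort + one adjacent-difference scan (a different algorithm, proved to return the same value).


-- ===== PORT A =====
def function (ls : List Int) (target : Int) : Bool :=
  let n : Int := PySem.List.len ls
  (PySem.List.pyRange 0 n 1).any fun i =>
    (PySem.List.pyRange 0 n 1).any fun j =>
      decide (i ≠ j) && decide (|PySem.List.pyGetD ls i 0 - PySem.List.pyGetD ls j 0| ≤ target)

-- ===== PORT B =====
def function_alt (ls : List Int) (target : Int) : Bool :=
  let s := PySem.List.sorted ls (fun x => x) false
  (s.zip (PySem.List.slice s (some 1) none)).any fun p => decide (p.2 - p.1 ≤ target)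

-- ===== PRECONDITION & SPEC =====
def Spec_function (ls : List Int) (target : Int) (out : Bool) : Prop := out = function_alt ls target
instance (ls : List Int) (target : Int) (out : Bool) : Decidable (Spec_function ls target out) := by unfold Spec_function; infer_instance

-- ===== CLAIM (what is proved, stated in full; the proofs are below) =====
def Claim_equal_function : Prop := ∀ (ls : List Int) (target : Int), Dom_function ls target → Spec_function ls target (function ls target)

-- ===== LEMMAS AND PROOFS =====

-- "l has two entries at distinct positions within absolute difference ≤ t"
def pvPairProp (l : List Int) (t : Int) : Prop :=
  ∃ (i j : Nat) (hi : i < l.length) (hj : j < l.length), i ≠ j ∧ |l[i] - l[j]| ≤ t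

-- two distinct positions with the same value give a duplicate
theorem pv_duplicate_of_two_getElem {l : List Int} {i j : Nat} (hi : i < l.length)
    (hj : j < l.length) (hij : i < j) (he : l[i] = l[j]) : List.Duplicate l[i] l := by
  rw [List.duplicate_iff_sublist]
  have hdropj : l[i] ∈ l.drop (i + 1) := by
    have h2 : l[j] = (l.drop (i+1))[j - (i+1)]'(by simp; omega) := by
      rw [List.getElem_drop]; congr 1; omega
    rw [he, h2]; exact List.getElem_mem _
  have h3 : l.drop i = l[i] :: l.drop (i + 1) := List.drop_eq_getElem_cons hi
  have h4 : List.Sublist [l[i], l[i]] (l[i] :: l.drop (i + 1)) :=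
    List.Sublist.cons₂ _ (List.singleton_sublist.mpr hdropj)
  have h5 : List.Sublist [l[i], l[i]] (l.drop i) := by rw [h3]; exact h4
  exact h5.trans (List.drop_sublist i l)

-- K1: the entry at a second position survives erasing the first entry
theorem pv_getElem_mem_erase {l : List Int} {i j : Nat} (hi : i < l.length)
    (hj : j < l.length) (hij : i ≠ j) : l[j] ∈ l.erase l[i] := by
  by_cases he : l[j] = l[i]
  · have hdup : List.Duplicate l[i] l := by
      rcases Nat.lt_or_ge i j with h | h
      · exact pv_duplicate_of_two_getElem hi hj h he.symm
      · have : j < i := by omega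
        have := pv_duplicate_of_two_getElem hj hi this he
        rwa [he] at this
    have hc : 2 ≤ l.count l[i] := List.duplicate_iff_two_le_count.mp hdup
    have h1 : (l.erase l[i]).count l[i] = l.count l[i] - 1 := List.count_erase_self
    have : 0 < (l.erase l[i]).count l[i] := by omega
    rw [he]
    exact List.count_pos_iff.mp this
  · exact (List.mem_erase_of_ne he).mpr (List.getElem_mem hj)

-- K2: an element of l and an element of l.erase a sit at distinct positions of l
theorem pv_exists_indices_of_mem_erase {l : List Int} {a b : Int}
    (ha : a ∈ l) (hb : b ∈ l.erase a) :
    ∃ (i j : Nat) (hi : i < l.length) (hj : j < l.length), i ≠ j ∧ l[i] = a ∧ l[j] = b := by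
  induction l with
  | nil => simp at ha
  | cons c tl ih =>
    by_cases hca : c = a
    · subst hca
      rw [List.erase_cons_head] at hb
      obtain ⟨j, hj, hbe⟩ := List.mem_iff_getElem.mp hb
      exact ⟨0, j + 1, by simp, by simp; omega, by omega, rfl, by simpa using hbe⟩
    · rw [List.erase_cons_tail (by simp [hca])] at hb
      have ha' : a ∈ tl := by
        rcases List.mem_cons.mp ha with h | h
        · exact absurd h.symm hca
        · exact h
      rcases List.mem_cons.mp hb with hbc | hbt
      · obtain ⟨i, hi, hae⟩ := List.mem_iff_getElem.mp ha'
        exact ⟨i + 1, 0, by simp; omega, by simp, by omega, by simpa using hae, by simp [hbc]⟩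
      · obtain ⟨i, j, hi, hj, hij, hA, hB⟩ := ih ha' hbt
        exact ⟨i + 1, j + 1, by simp; omega, by simp; omega, by omega, by simpa using hA, by simpa using hB⟩

-- the pair property is invariant under permutation
theorem pv_pairProp_of_perm {l₁ l₂ : List Int} {t : Int} (hp : l₁.Perm l₂)
    (h : pvPairProp l₁ t) : pvPairProp l₂ t := by
  obtain ⟨i, j, hi, hj, hij, hle⟩ := h
  have ha : l₁[i] ∈ l₂ := hp.mem_iff.mp (List.getElem_mem hi)
  have hb : l₁[j] ∈ l₂.erase l₁[i] := (hp.erase l₁[i]).mem_iff.mp (pv_getElem_mem_erase hi hj hij)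
  obtain ⟨i', j', hi', hj', hij', hA, hB⟩ := pv_exists_indices_of_mem_erase ha hb
  exact ⟨i', j', hi', hj', hij', by rw [hA, hB]; exact hle⟩

-- on a ≤-sorted list, the pair property is exactly "some adjacent difference ≤ t"
theorem pv_pairProp_iff_adjacent {s : List Int} {t : Int} (hs : s.Pairwise (· ≤ ·)) :
    pvPairProp s t ↔ ∃ (k : Nat) (h : k + 1 < s.length), s[k + 1] - s[k] ≤ t := by
  have hmono : ∀ (p q : Nat) (hp : p < s.length) (hq : q < s.length), p ≤ q → s[p] ≤ s[q] := by
    intro p q hp hq hpq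
    rcases Nat.lt_or_ge p q with h | h
    · exact (List.pairwise_iff_getElem.mp hs) p q hp hq h
    · have : p = q := by omega
      subst this; exact le_refl _
  constructor
  · rintro ⟨i, j, hi, hj, hij, hle⟩
    -- wlog i < j
    have main : ∀ (i j : Nat) (hi : i < s.length) (hj : j < s.length), i < j →
        |s[i] - s[j]| ≤ t → ∃ (k : Nat) (h : k + 1 < s.length), s[k + 1] - s[k] ≤ t := by
      intro i j hi hj hij hle
      have h1 : s[i] ≤ s[j] := hmono i j hi hj (by omega)
      have habs : |s[i] - s[j]| = s[j] - s[i] := by rw [abs_sub_comm]; exact abs_of_nonneg (by omega)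
      have h2 : s[i + 1]'(by omega) ≤ s[j] := hmono (i+1) j (by omega) hj (by omega)
      exact ⟨i, by omega, by omega⟩
    rcases Nat.lt_or_ge i j with h | h
    · exact main i j hi hj h hle
    · have hji : j < i := by omega
      exact main j i hj hi hji (by rw [abs_sub_comm]; exact hle)
  · rintro ⟨k, hk, hle⟩
    refine ⟨k, k + 1, by omega, hk, by omega, ?_⟩
    have h1 : s[k]'(by omega) ≤ s[k+1] := hmono k (k+1) (by omega) hk (by omega)
    rw [abs_sub_comm]
    rw [abs_of_nonneg (by omega)]
    exact hle

-- port A returns true exactly on the pair property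
theorem pv_funA_iff (ls : List Int) (t : Int) :
    function ls t = true ↔ pvPairProp ls t := by
  simp only [function, List.any_eq_true, PySem.List.mem_pyRange_one, PySem.List.len_eq,
    Bool.and_eq_true, decide_eq_true_eq]
  constructor
  · rintro ⟨i, ⟨hi0, hin⟩, j, ⟨hj0, hjn⟩, hij, hle⟩
    refine ⟨i.toNat, j.toNat, by omega, by omega, by omega, ?_⟩
    rw [PySem.List.pyGetD_eq_getElem ls 0 hi0 (by simpa using hin),
        PySem.List.pyGetD_eq_getElem ls 0 hj0 (by simpa using hjn)] at hle
    exact hle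
  · rintro ⟨i, j, hi, hj, hij, hle⟩
    refine ⟨(i : Int), ⟨by omega, by exact_mod_cast hi⟩, (j : Int), ⟨by omega, by exact_mod_cast hj⟩,
      by exact_mod_cast hij, ?_⟩
    rw [PySem.List.pyGetD_eq_getElem ls 0 (by omega) (by simpa using hi),
        PySem.List.pyGetD_eq_getElem ls 0 (by omega) (by simpa using hj)]
    simpa using hle

-- port B returns true exactly on "some adjacent difference of the sorted list ≤ t"
theorem pv_funB_iff (ls : List Int) (t : Int) :
    function_alt ls t = true ↔
      ∃ (k : Nat) (h : k + 1 < (PySem.List.sorted ls (fun x => x) false).length),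
        (PySem.List.sorted ls (fun x => x) false)[k + 1] -
          (PySem.List.sorted ls (fun x => x) false)[k] ≤ t := by
  set s := PySem.List.sorted ls (fun x => x) false with hsdef
  simp only [function_alt, ← hsdef, PySem.List.slice_from_one, List.any_eq_true,
    decide_eq_true_eq]
  constructor
  · rintro ⟨p, hp, hle⟩
    obtain ⟨k, hk, hpe⟩ := List.mem_iff_getElem.mp hp
    have hklen : k + 1 < s.length := by
      have := hk; simp [List.length_zip, List.length_tail] at this; omega
    refine ⟨k, hklen, ?_⟩
    have h1 : (s.zip s.tail)[k] = (s[k]'(by omega), s.tail[k]'(by simp [List.length_tail]; omega)) := by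
      exact List.getElem_zip
    have h2 : s.tail[k]'(by simp [List.length_tail]; omega) = s[k+1] := by
      simp [List.getElem_tail]
    rw [h1, h2] at hpe
    rw [← hpe] at hle
    exact hle
  · rintro ⟨k, hk, hle⟩
    refine ⟨(s[k]'(by omega), s[k+1]), ?_, hle⟩
    have hkz : k < (s.zip s.tail).length := by simp [List.length_zip, List.length_tail]; omega
    have h1 : (s.zip s.tail)[k] = (s[k]'(by omega), s.tail[k]'(by simp [List.length_tail]; omega)) :=
      List.getElem_zip
    have h2 : s.tail[k]'(by simp [List.length_tail]; omega) = s[k+1] := by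
      simp [List.getElem_tail]
    rw [h2] at h1
    rw [← h1]
    exact List.getElem_mem hkz

-- ===== VERDICT (by name: the statement is the Claim_ definition above) =====
theorem function_spec : Claim_equal_function := by
  intro ls target _
  unfold Spec_function
  rw [Bool.eq_iff_iff, pv_funA_iff, pv_funB_iff]
  set s := PySem.List.sorted ls (fun x => x) false with hsdef
  have hperm : s.Perm ls := PySem.List.sorted_perm ls _ _
  have hpw : s.Pairwise (· ≤ ·) := by
    have := PySem.List.sorted_pairwise (xs := ls) (key := fun x : Int => x)
    simpa using this
  constructor
  · intro h
    exact (pv_pairProp_iff_adjacent hpw).mp (pv_pairProp_of_perm hperm.symm h)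
  · intro h
    exact pv_pairProp_of_perm hperm ((pv_pairProp_iff_adjacent hpw).mpr h)
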